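-- pv_equiv track=rewrite | github.com/darr/offer_algri | offer_algri/整数中1出现的次数/p.py | NumberOf1Between1AndN_Solution
-- ===== SOURCE A (Python) =====
-- def NumberOf1Between1AndN_Solution(n):
--     k = 1
--     if n < k:
--         return 0
--     count, m = 0, 1
--     while m <= n:
--         weight = n // m % 10
--         count += (n // m) // 10 * m
--         if weight == k:
--             count += (n%m + 1)
--         if weight > k:
--             count += m
--         m *= 10
--     return count
-- ===== SOURCE B (Python) =====
-- def NumberOf1Between1AndN_Solution(n):
--     if n < 1:
--         return 0
--     q, d = divmod(n, 10)
--     ones = 0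
--     x = q
--     while x:
--         if x % 10 == 1:
--             ones += 1
--         x //= 10
--     return 10 * NumberOf1Between1AndN_Solution(q - 1) + q + (d + 1) * ones + (1 if d >= 1 else 0)
-- ===== Notes on version B (the rewrite author's own statement) =====
-- stated objective: alternative
-- what changed: Replaces A's iterative per-place closed form (a loop over powers of ten comparing each 'weight' digit) with a recursion that peels off the last decimal digit and applies the standard block-counting identity in terms of the quotient, the last digit and the digit-one count of the quotient.
import Mathlib
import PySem

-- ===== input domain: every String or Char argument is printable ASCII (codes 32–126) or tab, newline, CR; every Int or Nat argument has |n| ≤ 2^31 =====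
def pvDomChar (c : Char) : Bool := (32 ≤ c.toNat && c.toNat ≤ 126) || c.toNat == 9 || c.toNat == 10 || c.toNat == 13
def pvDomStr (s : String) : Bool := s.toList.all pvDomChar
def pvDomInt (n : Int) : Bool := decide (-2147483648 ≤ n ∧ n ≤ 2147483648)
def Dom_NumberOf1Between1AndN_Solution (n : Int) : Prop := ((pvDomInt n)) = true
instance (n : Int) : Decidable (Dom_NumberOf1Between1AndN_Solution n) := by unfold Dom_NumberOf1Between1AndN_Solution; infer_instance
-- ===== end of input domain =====

-- B replaces A's iterative per-place closed form by a recursion peeling the last digit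
-- with the block-counting identity (alternative algorithm of similar cost).

-- ===== PORT A =====
-- the while-loop of A; the invariant 1 ≤ m is carried as a hypothesis for termination
def pvA_loop (n m count : Int) (hm : 1 ≤ m) : Int :=
  if _h : m ≤ n then
    let weight := PySem.Int.mod (PySem.Int.floordiv n m) 10
    let count := count + PySem.Int.floordiv (PySem.Int.floordiv n m) 10 * m
    let count := if weight = 1 then count + (PySem.Int.mod n m + 1) else count
    let count := if weight > 1 then count + m else count
    pvA_loop n (m * 10) count (by omega)
  else count
termination_by (n + 1 - m).toNat
decreasing_by all_goals omega

def NumberOf1Between1AndN_Solution (n : Int) : Int :=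
  let k : Int := 1
  if n < k then 0
  else pvA_loop n 1 0 (by norm_num)

-- ===== PORT B =====
-- the inner while-loop of B: counts the '1' digits of x (x is nonnegative wherever B calls it)
def pvOnes (i : Int) : Int :=
  if _h : 0 < i then
    (if PySem.Int.mod i 10 = 1 then 1 else 0) + pvOnes (PySem.Int.floordiv i 10)
  else 0
termination_by i.toNat
decreasing_by
  rw [PySem.Int.floordiv_eq_ediv_of_pos (by norm_num)]
  omega

def NumberOf1Between1AndN_Solution_alt (n : Int) : Int :=
  if _h : n < 1 then 0
  else
    let q := PySem.Int.floordiv n 10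
    let d := PySem.Int.mod n 10
    10 * NumberOf1Between1AndN_Solution_alt (q - 1) + q + (d + 1) * pvOnes q
      + (if 1 ≤ d then 1 else 0)
termination_by n.toNat
decreasing_by
  simp only [PySem.Int.floordiv_eq_ediv_of_pos (show (0:Int) < 10 by norm_num)]
  omega

-- ===== PRECONDITION & SPEC =====
def Spec_NumberOf1Between1AndN_Solution (n : Int) (out : Int) : Prop := out = NumberOf1Between1AndN_Solution_alt n
instance (n : Int) (out : Int) : Decidable (Spec_NumberOf1Between1AndN_Solution n out) := by unfold Spec_NumberOf1Between1AndN_Solution; infer_instance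

-- ===== CLAIM (what is proved, stated in full; the proofs are below) =====
def Claim_equal_NumberOf1Between1AndN_Solution : Prop := ∀ (n : Int), Dom_NumberOf1Between1AndN_Solution n → Spec_NumberOf1Between1AndN_Solution n (NumberOf1Between1AndN_Solution n)

-- ===== LEMMAS AND PROOFS =====

-- uniqueness of quotient and remainder for a positive divisor
theorem pvDivModUnique (a b : Int) (hb : 0 < b) (q r : Int) (h : a = b * q + r)
    (h0 : 0 ≤ r) (h1 : r < b) : a / b = q ∧ a % b = r := by
  have h' : a = r + b * q := by omega
  constructor
  · rw [h', Int.add_mul_ediv_left _ _ (by omega : b ≠ 0), Int.ediv_eq_zero_of_lt h0 h1]; ring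
  · rw [h', Int.add_mul_emod_self_left, Int.emod_eq_of_lt h0 h1]

-- number of places 10^j·m ≤ n at which the digit of n is 1
def pvCnt (n m : Int) (hm : 1 ≤ m) : Int :=
  if _h : m ≤ n then (if n / m % 10 = 1 then 1 else 0) + pvCnt n (m * 10) (by omega)
  else 0
termination_by (n + 1 - m).toNat
decreasing_by all_goals omega

-- one loop-body contribution of A, written with Lean's Euclidean / and %
def pvTerm (n m : Int) : Int :=
  n / m / 10 * m + (if n / m % 10 = 1 then n % m + 1 else if 1 < n / m % 10 then m else 0)

theorem pvA_loop_eq (n m c : Int) (hm : 1 ≤ m) :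
    pvA_loop n m c hm =
      if m ≤ n then pvA_loop n (m * 10) (c + pvTerm n m) (by omega) else c := by
  rw [pvA_loop]
  simp only [PySem.Int.floordiv_eq_ediv_of_pos (show (0:Int) < m by omega),
    PySem.Int.mod_eq_emod_of_pos (show (0:Int) < m by omega),
    PySem.Int.floordiv_eq_ediv_of_pos (show (0:Int) < 10 by norm_num),
    PySem.Int.mod_eq_emod_of_pos (show (0:Int) < 10 by norm_num)]
  by_cases h : m ≤ n
  · rw [dif_pos h, if_pos h]
    congr 1
    unfold pvTerm
    generalize n / m / 10 * m = t
    split_ifs <;> omega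
  · rw [dif_neg h, if_neg h]

theorem pvA_loop_acc (n m c : Int) (hm : 1 ≤ m) :
    pvA_loop n m c hm = c + pvA_loop n m 0 hm := by
  rw [pvA_loop_eq n m c, pvA_loop_eq n m 0]
  split_ifs with h
  · rw [pvA_loop_acc n (m * 10) (c + pvTerm n m), pvA_loop_acc n (m * 10) (0 + pvTerm n m)]
    ring
  · ring
termination_by (n + 1 - m).toNat
decreasing_by all_goals omega

theorem pvA_loop_zero (n m : Int) (hm : 1 ≤ m) :
    pvA_loop n m 0 hm =
      if m ≤ n then pvTerm n m + pvA_loop n (m * 10) 0 (by omega) else 0 := by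
  rw [pvA_loop_eq n m 0]
  split_ifs with h
  · rw [pvA_loop_acc]; ring
  · rfl

-- stepping n down by one changes each loop term by the corresponding digit indicator
theorem pvTerm_step (n m : Int) (hm : 1 ≤ m) (h : m ≤ n - 1) :
    pvTerm n m = pvTerm (n - 1) m + (if n / m % 10 = 1 then 1 else 0) := by
  have hdm : m * (n / m) + n % m = n := Int.mul_ediv_add_emod n m
  have hr0 : 0 ≤ n % m := Int.emod_nonneg n (by omega)
  have hr1 : n % m < m := Int.emod_lt_of_pos n (by omega)
  by_cases hc : 1 ≤ n % m
  · have h1 := pvDivModUnique (n - 1) m (by omega) (n / m) (n % m - 1)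
      (by linarith [hdm]) (by omega) (by omega)
    rw [pvTerm, pvTerm, h1.1, h1.2]
    generalize n / m / 10 * m = t
    split_ifs <;> omega
  · have hr00 : n % m = 0 := by omega
    have hq1 : 1 ≤ n / m := (Int.le_ediv_iff_mul_le (by omega)).2 (by omega)
    have h1 := pvDivModUnique (n - 1) m (by omega) (n / m - 1) (m - 1)
      (by rw [mul_sub, mul_one]; linarith [hdm]) (by omega) (by omega)
    rw [pvTerm, pvTerm, h1.1, h1.2, hr00]
    by_cases hq0 : n / m % 10 = 0
    · have e1 : (n / m - 1) / 10 = n / m / 10 - 1 := by omega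
      have e2 : (n / m - 1) % 10 = 9 := by omega
      rw [e1, e2]
      norm_num [hq0]
      ring
    · have e1 : (n / m - 1) / 10 = n / m / 10 := by omega
      have e2 : (n / m - 1) % 10 = n / m % 10 - 1 := by omega
      rw [e1, e2]
      generalize n / m / 10 * m = t
      split_ifs <;> omega

-- stepping n down by one changes A's whole loop by the number of 1-digits counted by pvCnt
theorem pvA_loop_step (n m : Int) (hm : 1 ≤ m) (hn : 1 ≤ n) :
    pvA_loop n m 0 hm = pvA_loop (n - 1) m 0 hm + pvCnt n m hm := by
  rw [pvA_loop_zero n m, pvA_loop_zero (n - 1) m, pvCnt]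
  by_cases h1 : m ≤ n - 1
  · have h2 : m ≤ n := by omega
    rw [if_pos h1, if_pos h2, dif_pos h2]
    rw [pvA_loop_step n (m * 10) (by omega) hn]
    rw [pvTerm_step n m hm h1]
    ring
  · by_cases h2 : m ≤ n
    · have hmn : m = n := by omega
      have h10 : ¬ (m * 10 ≤ n) := by omega
      rw [if_pos h2, if_neg h1, dif_pos h2, pvA_loop_zero n (m * 10), if_neg h10, pvCnt, dif_neg h10]
      subst hmn
      rw [pvTerm, Int.ediv_self (by omega : m ≠ 0), Int.emod_self]
      norm_num
    · rw [if_neg h1, if_neg h2, dif_neg h2]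
      ring
termination_by (n + 1 - m).toNat
decreasing_by all_goals omega

-- pvCnt counts exactly the 1-digits of n / m
theorem pvCnt_eq_ones (n m : Int) (hm : 1 ≤ m) (hn : 0 ≤ n) :
    pvCnt n m hm = pvOnes (n / m) := by
  rw [pvCnt, pvOnes]
  have hio : (0 < n / m) ↔ m ≤ n := by
    rw [show (0:Int) < n / m ↔ 1 ≤ n / m from by omega, Int.le_ediv_iff_mul_le (by omega)]
    omega
  by_cases h : m ≤ n
  · rw [dif_pos h, dif_pos (hio.2 h)]
    congr 1
    · rw [PySem.Int.mod_eq_emod_of_pos (by norm_num)]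
    · rw [pvCnt_eq_ones n (m * 10) (by omega) hn,
        PySem.Int.floordiv_eq_ediv_of_pos (by norm_num),
        Int.ediv_ediv_of_nonneg (by omega : (0:Int) ≤ m)]
  · rw [dif_neg h, dif_neg (by rw [hio]; exact h)]
termination_by (n + 1 - m).toNat
decreasing_by all_goals omega

-- dividing n by ten turns A's loop from place m·10 into the loop of n/10 from place m
theorem pvTerm_digit (n m : Int) (hm : 1 ≤ m) :
    pvTerm n (m * 10) =
      10 * pvTerm (n / 10) m + (n % 10 - 9) * (if n / 10 / m % 10 = 1 then 1 else 0) := by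
  have e1 : m * (n / 10 / m) + (n / 10) % m = n / 10 := Int.mul_ediv_add_emod (n / 10) m
  have e2 : 10 * (n / 10) + n % 10 = n := by omega
  have hr0 : 0 ≤ (n / 10) % m := Int.emod_nonneg _ (by omega)
  have hr1 : (n / 10) % m < m := Int.emod_lt_of_pos _ (by omega)
  have key := pvDivModUnique n (m * 10) (by omega) (n / 10 / m) (10 * ((n / 10) % m) + n % 10)
    (by rw [show (m * 10) * (n / 10 / m) = 10 * (m * (n / 10 / m)) from by ring]
        have e3 : 0 ≤ n % 10 ∧ n % 10 < 10 := by omega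
        linarith [e1, e2, e3.1, e3.2])
    (by omega) (by omega)
  rw [pvTerm, pvTerm, key.1, key.2]
  split_ifs <;> ring

theorem pvA_loop_digit (n m : Int) (hm : 1 ≤ m) (h10 : 1 ≤ m * 10) :
    pvA_loop n (m * 10) 0 h10 =
      10 * pvA_loop (n / 10) m 0 hm + (n % 10 - 9) * pvCnt (n / 10) m hm := by
  rw [pvA_loop_zero n (m * 10), pvA_loop_zero (n / 10) m, pvCnt]
  have hiff : m * 10 ≤ n ↔ m ≤ n / 10 := by
    rw [Int.le_ediv_iff_mul_le (by norm_num : (0:Int) < 10)]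
  by_cases h : m * 10 ≤ n
  · rw [if_pos h, if_pos (hiff.1 h), dif_pos (hiff.1 h)]
    rw [pvA_loop_digit n (m * 10) (by omega) (by omega)]
    rw [pvTerm_digit n m hm]
    ring
  · rw [if_neg h, if_neg (fun hh => h (hiff.2 hh)), dif_neg (fun hh => h (hiff.2 hh))]
    ring
termination_by (n + 1 - m).toNat
decreasing_by all_goals omega

theorem pvA_eq_loop (t : Int) :
    NumberOf1Between1AndN_Solution t = pvA_loop t 1 0 le_rfl := by
  rw [NumberOf1Between1AndN_Solution]
  by_cases h : t < 1
  · rw [if_pos h, pvA_loop_eq t 1 0, if_neg (by omega : ¬ (1:Int) ≤ t)]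
  · rw [if_neg h]

-- one downward step at the outermost place, valid for every 0 ≤ t
theorem pvA_loop_step1 (t : Int) (ht : 0 ≤ t) :
    pvA_loop t 1 0 le_rfl = pvA_loop (t - 1) 1 0 le_rfl + pvOnes t := by
  by_cases h : t = 0
  · subst h
    rw [pvA_loop_eq 0 1 0, pvA_loop_eq (0 - 1) 1 0, pvOnes]
    norm_num
  · have h1 : 1 ≤ t := by omega
    rw [pvA_loop_step t 1 le_rfl h1, pvCnt_eq_ones t 1 le_rfl ht, Int.ediv_one]

theorem pvTerm_one (n : Int) : pvTerm n 1 = n / 10 + (if 1 ≤ n % 10 then 1 else 0) := by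
  rw [pvTerm, Int.ediv_one, Int.emod_one]
  split_ifs <;> omega

-- B unfolded for n ≥ 1, with Euclidean / and %
theorem pvAlt_eq (n : Int) (h : ¬ n < 1) :
    NumberOf1Between1AndN_Solution_alt n =
      10 * NumberOf1Between1AndN_Solution_alt (n / 10 - 1) + n / 10
        + (n % 10 + 1) * pvOnes (n / 10) + (if 1 ≤ n % 10 then 1 else 0) := by
  rw [NumberOf1Between1AndN_Solution_alt]
  rw [dif_neg h]
  simp only [PySem.Int.floordiv_eq_ediv_of_pos (show (0:Int) < 10 by norm_num),
    PySem.Int.mod_eq_emod_of_pos (show (0:Int) < 10 by norm_num)]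

theorem pvMain (N : Nat) : ∀ n : Int, n ≤ (N : Int) →
    NumberOf1Between1AndN_Solution n = NumberOf1Between1AndN_Solution_alt n := by
  induction N using Nat.strong_induction_on with
  | _ N IH =>
    intro n hn
    by_cases h : n < 1
    · rw [pvA_eq_loop, pvA_loop_eq n 1 0, if_neg (by omega : ¬ (1:Int) ≤ n),
        NumberOf1Between1AndN_Solution_alt, dif_pos h]
    · have h1 : (1:Int) ≤ n := by omega
      have hN : 1 ≤ N := by omega
      have hq0 : 0 ≤ n / 10 := Int.ediv_nonneg (by omega) (by norm_num)
      rw [pvA_eq_loop n, pvA_loop_zero n 1, if_pos h1,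
        pvA_loop_digit n 1 le_rfl (by norm_num),
        pvA_loop_step1 (n / 10) hq0,
        pvCnt_eq_ones (n / 10) 1 le_rfl hq0, Int.ediv_one,
        ← pvA_eq_loop (n / 10 - 1)]
      have hIH : NumberOf1Between1AndN_Solution (n / 10 - 1)
          = NumberOf1Between1AndN_Solution_alt (n / 10 - 1) := by
        apply IH (N - 1) (by omega)
        have : n / 10 ≤ n := by omega
        push_cast [Nat.cast_sub hN]
        omega
      rw [hIH, pvAlt_eq n h, pvTerm_one n]
      ring

-- ===== VERDICT (by name: the statement is the Claim_ definition above) =====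
theorem NumberOf1Between1AndN_Solution_spec : Claim_equal_NumberOf1Between1AndN_Solution := by
  intro n _
  unfold Spec_NumberOf1Between1AndN_Solution
  exact pvMain n.toNat n (Int.self_le_toNat n)
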